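-- pv_equiv track=rewrite | github.com/SamuelJesik/BP | media/uploads/1/34_1_ueHKaar.py | find_minimum_max_jump
-- ===== SOURCE A (Python) =====
-- def calculate_distances(n, m):
--     distances = [1 + (i ** 2 % m) for i in range(n)]
--     return distances
--
-- def is_possible(max_jump, distances, j):
--     n = len(distances)
--     jumps = 0
--     current_distance = 0
--
--     for i in range(n):
--         if distances[i] > max_jump:
--             return False
--         current_distance += distances[i]
--         if current_distance > max_jump:
--             jumps += 1
--             current_distance = distances[i]
--         if jumps > j:
--             return False
--
--     return jumps + 1 <= j
--
-- def find_minimum_max_jump(n, m, j):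
--     distances = calculate_distances(n, m)
--     low, high = 1, sum(distances)
--
--     while low < high:
--         mid = (low + high) // 2
--         if is_possible(mid, distances, j):
--             high = mid
--         else:
--             low = mid + 1
--
--     return low
-- ===== SOURCE B (Python) =====
-- def calculate_distances(n, m):
--     distances = [1 + (i ** 2 % m) for i in range(n)]
--     return distances
--
-- def find_minimum_max_jump(n, m, j):
--     distances = calculate_distances(n, m)
--     size = len(distances)
--     if size and j >= size:
--         # with at least as many segments allowed as elements, the answer
--         # is simply the largest single distance
--         return max(distances)
--     prefix = [0]
--     for d in distances:
--         prefix.append(prefix[-1] + d)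
--     total = prefix[size]
--
--     def upper_index(x, lo, hi):
--         # first index in [lo, hi) whose prefix sum exceeds x (hi if none)
--         while lo < hi:
--             mid = (lo + hi) // 2
--             if prefix[mid] <= x:
--                 lo = mid + 1
--             else:
--                 hi = mid
--         return lo
--
--     def feasible(v):
--         # greedy: jump each segment in one go via binary search on prefix sums
--         pos, count = 0, 0
--         while pos < size:
--             if count >= j:
--                 return False
--             nxt = upper_index(prefix[pos] + v, pos, size + 1) - 1
--             if nxt == pos:
--                 return False
--             pos, count = nxt, count + 1
--         return True
--
--     # build the answer by descending power-of-two lifting inside [1, total]: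
--     # keep v infeasible, finish with v + 1 feasible (or with the cap total)
--     v, step = 0, 1
--     while step <= total:
--         step *= 2
--     while step:
--         if v + step < total and not feasible(v + step):
--             v += step
--         step //= 2
--     return v + 1
-- ===== Notes on version B (the rewrite author's own statement) =====
-- stated objective: alternative
-- what changed: B replaces A's low/high binary search over the answer (with an elementwise greedy scan per probe) by: prefix sums computed once, a greedy feasibility check that jumps a whole segment at a time via hand-rolled bisection on the prefix sums, a descending power-of-two lifting loop capped at the total that builds the answer additively instead of shrinking an interval, and a direct max(distances) shortcut when j >= len(distances).
-- outside the precondition, e.g. on find_minimum_max_jump(5, -3, 2): A returns 1, B returns 1; on find_minimum_max_jump(4, -5, 1): A returns 1, B returns 1; on find_minimum_max_jump(3, 0, 2): A raises ZeroDivisionError, B raises ZeroDivisionError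
import Mathlib
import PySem

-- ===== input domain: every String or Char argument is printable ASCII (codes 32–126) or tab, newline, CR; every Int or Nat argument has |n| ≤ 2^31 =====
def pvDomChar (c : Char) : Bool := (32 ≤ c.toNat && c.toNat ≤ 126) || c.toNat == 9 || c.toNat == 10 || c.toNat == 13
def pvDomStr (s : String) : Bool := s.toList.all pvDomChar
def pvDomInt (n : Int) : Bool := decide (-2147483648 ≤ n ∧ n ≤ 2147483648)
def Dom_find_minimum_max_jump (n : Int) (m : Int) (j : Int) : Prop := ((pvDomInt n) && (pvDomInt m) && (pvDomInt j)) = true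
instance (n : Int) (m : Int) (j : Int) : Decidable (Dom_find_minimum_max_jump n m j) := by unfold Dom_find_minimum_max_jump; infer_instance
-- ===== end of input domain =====

-- B replaces A's binary search on the answer by power-of-two answer lifting capped at
-- the total, over a prefix-sum array whose greedy feasibility check jumps whole
-- segments by binary search on the prefix sums (plus a direct max for j ≥ len):
-- an alternative, not claimed faster. Equality of return values is proved on Pre_ below.

-- ===== PORT A =====
def pvDistancesA (n m : Int) : List Int :=
  (PySem.List.pyRange 0 n 1).map (fun i => 1 + PySem.Int.mod (i ^ 2) m)

def pvIsPossibleGo (v j : Int) : List Int → Int → Int → Bool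
  | [], jumps, _cur => decide (jumps + 1 ≤ j)
  | d :: rest, jumps, cur =>
    if v < d then false
    else
      let c := cur + d
      let jumps' := if v < c then jumps + 1 else jumps
      let cur' := if v < c then d else c
      if j < jumps' then false
      else pvIsPossibleGo v j rest jumps' cur'

def pvIsPossible (v : Int) (distances : List Int) (j : Int) : Bool :=
  pvIsPossibleGo v j distances 0 0

-- fuel only makes the while loop total; it is never exhausted (gap < fuel)
def pvBSearchGo (distances : List Int) (j : Int) : Nat → Int → Int → Int
  | 0, low, _ => low
  | fuel + 1, low, high =>
    if low < high then
      let mid := PySem.Int.floordiv (low + high) 2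
      if pvIsPossible mid distances j then pvBSearchGo distances j fuel low mid
      else pvBSearchGo distances j fuel (mid + 1) high
    else low

def pvBSearch (distances : List Int) (j low high : Int) : Int :=
  pvBSearchGo distances j ((high - low).toNat + 1) low high

def find_minimum_max_jump (n : Int) (m : Int) (j : Int) : Int :=
  let distances := pvDistancesA n m
  let low : Int := 1
  let high : Int := distances.sum
  pvBSearch distances j low high

-- ===== PORT B =====
def pvDistancesB (n m : Int) : List Int :=
  (PySem.List.pyRange 0 n 1).map (fun i => 1 + PySem.Int.mod (i ^ 2) m)

-- the Source B prefix loop carries the list together with its last element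
def pvBuildPrefix (s : List Int × Int) (d : Int) : List Int × Int :=
  (s.1 ++ [s.2 + d], s.2 + d)

-- fuel only makes the while loop total; it is never exhausted (gap < fuel)
def pvUpperIndexGo (pre : List Int) (x : Int) : Nat → Int → Int → Int
  | 0, lo, _ => lo
  | fuel + 1, lo, hi =>
    if lo < hi then
      let mid := PySem.Int.floordiv (lo + hi) 2
      if PySem.List.pyGetD pre mid 0 ≤ x then pvUpperIndexGo pre x fuel (mid + 1) hi
      else pvUpperIndexGo pre x fuel lo mid
    else lo

def pvUpperIndex (pre : List Int) (x lo hi : Int) : Int :=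
  pvUpperIndexGo pre x ((hi - lo).toNat + 1) lo hi

-- fuel only makes the while loop total; it is never exhausted on Pre_ inputs
def pvFeasibleGo (pre : List Int) (size j v : Int) : Nat → Int → Int → Bool
  | 0, _, _ => false
  | fuel + 1, pos, count =>
    if pos < size then
      if j ≤ count then false
      else
        let nxt := pvUpperIndex pre (PySem.List.pyGetD pre pos 0 + v) pos (size + 1) - 1
        if nxt == pos then false
        else pvFeasibleGo pre size j v fuel nxt (count + 1)
    else true

def pvFeasible (pre : List Int) (size j v : Int) : Bool :=
  pvFeasibleGo pre size j v (size.toNat + 1) 0 0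

-- fuel only makes the doubling loop total; it is never exhausted for 1 ≤ step
def pvGrowGo (total : Int) : Nat → Int → Int
  | 0, step => step
  | fuel + 1, step => if step ≤ total then pvGrowGo total fuel (2 * step) else step

def pvGrow (total step : Int) : Int :=
  pvGrowGo total ((total + 1 - step).toNat + 1) step

-- fuel only makes the halving loop total; it is never exhausted (step.toNat < fuel)
def pvLiftGo (pre : List Int) (size j total : Int) : Nat → Int → Int → Int
  | 0, v, _ => v
  | fuel + 1, v, step =>
    if 0 < step then
      let v' := if v + step < total ∧ pvFeasible pre size j (v + step) = false then v + step else v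
      pvLiftGo pre size j total fuel v' (PySem.Int.floordiv step 2)
    else v

def pvLift (pre : List Int) (size j total v step : Int) : Int :=
  pvLiftGo pre size j total (step.toNat + 1) v step

def find_minimum_max_jump_alt (n : Int) (m : Int) (j : Int) : Int :=
  let distances := pvDistancesB n m
  let size : Int := distances.length
  if size ≠ 0 ∧ size ≤ j then
    (PySem.List.max? distances (fun d => d)).getD 0
  else
    let pre := (distances.foldl pvBuildPrefix ([0], 0)).1
    let total := PySem.List.pyGetD pre size 0
    pvLift pre size j total 0 (pvGrow total 1) + 1

-- ===== PRECONDITION & SPEC =====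
-- Pre_ excludes: m = 0 with n ≥ 1 (both programs raise ZeroDivisionError), and
-- m ≤ -3 with n ≥ 1 (some computed distances are negative, where A's binary
-- search over a non-monotone feasibility predicate returns an accidental,
-- probe-order-dependent value); for n ≤ 0 the distance list is empty and any m is admitted.
def Pre_find_minimum_max_jump (n : Int) (m : Int) (j : Int) : Prop :=
  (-2 ≤ m ∧ m ≠ 0) ∨ n ≤ 0
instance (n : Int) (m : Int) (j : Int) : Decidable (Pre_find_minimum_max_jump n m j) := by
  unfold Pre_find_minimum_max_jump; infer_instance

def pvWitness_find_minimum_max_jump : Int × Int × Int := (6, 3, 2)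

def Spec_find_minimum_max_jump (n : Int) (m : Int) (j : Int) (out : Int) : Prop := out = find_minimum_max_jump_alt n m j
instance (n : Int) (m : Int) (j : Int) (out : Int) : Decidable (Spec_find_minimum_max_jump n m j out) := by unfold Spec_find_minimum_max_jump; infer_instance

-- ===== CLAIM (what is proved, stated in full; the proofs are below) =====
def Claim_equal_find_minimum_max_jump : Prop := ∀ (n : Int) (m : Int) (j : Int), Dom_find_minimum_max_jump n m j → Pre_find_minimum_max_jump n m j → Spec_find_minimum_max_jump n m j (find_minimum_max_jump n m j)

-- ===== LEMMAS AND PROOFS =====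

-- proof-side model of A's greedy scan without early exits: (final jumps, final cur)
def pvRunA (v : Int) : List Int → Int → Int → Int × Int
  | [], k, c => (k, c)
  | d :: t, k, c => if v < c + d then pvRunA v t (k + 1) d else pvRunA v t k (c + d)

-- length of the maximal prefix whose (c +) sum stays ≤ v
def pvSegLenAux (v c : Int) : List Int → Nat
  | [] => 0
  | d :: t => if v < c + d then 0 else pvSegLenAux v (c + d) t + 1

def pvSegLen (v : Int) (xs : List Int) : Nat := pvSegLenAux v 0 xs

-- number of greedy segments (the max 1 keeps the recursion well-founded;
-- under the hypotheses used below the segment length is ≥ 1 anyway)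
def pvSegs (v : Int) (xs : List Int) : Nat :=
  if _h : xs = [] then 0 else 1 + pvSegs v (xs.drop (max 1 (pvSegLen v xs)))
termination_by xs.length
decreasing_by
  have : xs.length ≠ 0 := fun hl => _h (List.eq_nil_of_length_eq_zero hl)
  simp [List.length_drop]; omega

-- proof-side prefix-sum list
def pvPre (c : Int) : List Int → List Int
  | [] => [c]
  | d :: t => c :: pvPre (c + d) t

theorem pvRunA_fst_ge (v : Int) : ∀ (xs : List Int) (k c : Int), k ≤ (pvRunA v xs k c).1 := by
  intro xs
  induction xs with
  | nil => intro k c; simp [pvRunA]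
  | cons d t ih =>
    intro k c
    by_cases h : v < c + d
    · simpa [pvRunA, h] using le_trans (by omega) (ih (k + 1) d)
    · simpa [pvRunA, h] using ih k (c + d)

theorem pvIsPossibleGo_eq (v j : Int) : ∀ (xs : List Int) (k c : Int),
    pvIsPossibleGo v j xs k c = (decide (∀ d ∈ xs, d ≤ v) && decide ((pvRunA v xs k c).1 + 1 ≤ j)) := by
  intro xs
  induction xs with
  | nil => intro k c; simp [pvIsPossibleGo, pvRunA]
  | cons d t ih =>
    intro k c
    by_cases hvd : v < d
    · have hno : ¬ (d ≤ v) := by omega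
      simp [pvIsPossibleGo, hvd, hno]
    · have hdv : d ≤ v := by omega
      by_cases hc : v < c + d
      · by_cases hjj : j < k + 1
        · have hge := pvRunA_fst_ge v t (k + 1) d
          have hno : ¬ ((pvRunA v t (k + 1) d).1 + 1 ≤ j) := by omega
          simp [pvIsPossibleGo, pvRunA, hvd, hc, hjj, hno]
        · simp [pvIsPossibleGo, pvRunA, hvd, hc, hjj, ih, hdv]
      · by_cases hjj : j < k
        · have hge := pvRunA_fst_ge v t k (c + d)
          have hno : ¬ ((pvRunA v t k (c + d)).1 + 1 ≤ j) := by omega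
          simp [pvIsPossibleGo, pvRunA, hvd, hc, hjj, hno]
        · simp [pvIsPossibleGo, pvRunA, hvd, hc, hjj, ih, hdv]

theorem pvSegLenAux_char (v : Int) : ∀ (xs : List Int) (c : Int), c ≤ v →
    pvSegLenAux v c xs ≤ xs.length ∧
    c + ((xs.take (pvSegLenAux v c xs)).sum) ≤ v ∧
    (pvSegLenAux v c xs < xs.length → v < c + (xs.take (pvSegLenAux v c xs + 1)).sum) := by
  intro xs
  induction xs with
  | nil => intro c hc; simp [pvSegLenAux, hc]
  | cons d t ih =>
    intro c hc
    by_cases hcd : v < c + d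
    · refine ⟨by simp [pvSegLenAux, hcd], by simp [pvSegLenAux, hcd, hc], ?_⟩
      intro _
      simp [pvSegLenAux, hcd]
    · have hcd' : c + d ≤ v := by omega
      obtain ⟨ih1, ih2, ih3⟩ := ih (c + d) hcd'
      refine ⟨?_, ?_, ?_⟩
      · simp [pvSegLenAux, hcd]; omega
      · simp only [pvSegLenAux, if_neg hcd, List.take_succ_cons, List.sum_cons]
        omega
      · intro hlt
        simp only [pvSegLenAux, if_neg hcd, List.length_cons] at hlt
        have := ih3 (by omega)
        simp only [pvSegLenAux, if_neg hcd, List.take_succ_cons, List.sum_cons]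
        omega

theorem pvRunA_seg (v : Int) : ∀ (xs : List Int) (k c : Int), 0 ≤ c →
    (∀ d ∈ xs, 0 ≤ d ∧ d ≤ v) →
    (pvSegLenAux v c xs = xs.length ∧ pvRunA v xs k c = (k, c + xs.sum)) ∨
    (pvSegLenAux v c xs < xs.length ∧ pvRunA v xs k c = pvRunA v (xs.drop (pvSegLenAux v c xs)) (k + 1) 0) := by
  intro xs
  induction xs with
  | nil => intro k c _ _; left; simp [pvSegLenAux, pvRunA]
  | cons d t ih =>
    intro k c hc hb
    obtain ⟨hd0, hdv⟩ := hb d (List.mem_cons_self ..)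
    have hbt : ∀ x ∈ t, 0 ≤ x ∧ x ≤ v := fun x hx => hb x (List.mem_cons_of_mem _ hx)
    by_cases hcd : v < c + d
    · right
      have hs0 : pvSegLenAux v c (d :: t) = 0 := by simp [pvSegLenAux, hcd]
      refine ⟨by simp [hs0], ?_⟩
      rw [hs0, List.drop_zero]
      have hzd : ¬ (v < 0 + d) := by omega
      have hL : pvRunA v (d :: t) k c = pvRunA v t (k + 1) d := by
        simp only [pvRunA, if_pos hcd]
      have hR : pvRunA v (d :: t) (k + 1) 0 = pvRunA v t (k + 1) d := by
        have hvd : ¬ (v < d) := by omega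
        simp only [pvRunA, zero_add, if_neg hvd]
      rw [hL, hR]
    · rcases ih k (c + d) (by omega) hbt with ⟨h1, h2⟩ | ⟨h1, h2⟩
      · left
        constructor
        · simp [pvSegLenAux, hcd, h1]
        · simp only [pvRunA, if_neg hcd, h2, List.sum_cons]
          rw [add_assoc]
      · right
        constructor
        · simp [pvSegLenAux, hcd]; omega
        · simp only [pvRunA, if_neg hcd, h2, pvSegLenAux, List.drop_succ_cons]

theorem pvSegs_pos_eq (v : Int) {xs : List Int} (h : xs ≠ []) :
    pvSegs v xs = 1 + pvSegs v (xs.drop (max 1 (pvSegLen v xs))) := by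
  rw [pvSegs]; simp [h]

theorem pvSegLen_pos (v : Int) {d : Int} {t : List Int} (h0 : 0 ≤ d) (h1 : d ≤ v) :
    1 ≤ pvSegLen v (d :: t) := by
  have h : ¬ (v < 0 + d) := by omega
  simp only [pvSegLen, pvSegLenAux, if_neg h]
  omega

theorem pvRunA_jumps (v : Int) : ∀ (xs : List Int) (k : Int), xs ≠ [] →
    (∀ d ∈ xs, 0 ≤ d ∧ d ≤ v) →
    ((pvRunA v xs k 0).1 : Int) = k + (pvSegs v xs : Int) - 1 := by
  have H : ∀ (N : Nat) (xs : List Int) (k : Int), xs.length ≤ N → xs ≠ [] →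
      (∀ d ∈ xs, 0 ≤ d ∧ d ≤ v) →
      ((pvRunA v xs k 0).1 : Int) = k + (pvSegs v xs : Int) - 1 := by
    intro N
    induction N with
    | zero =>
      intro xs k h hne _
      exact absurd (List.eq_nil_of_length_eq_zero (by omega)) hne
    | succ N ih =>
      intro xs k h hne hb
      obtain ⟨d, t, rfl⟩ := List.exists_cons_of_ne_nil hne
      obtain ⟨hd0, hdv⟩ := hb d (List.mem_cons_self ..)
      have hseg1 : 1 ≤ pvSegLenAux v 0 (d :: t) := pvSegLen_pos v hd0 hdv
      rcases pvRunA_seg v (d :: t) k 0 le_rfl hb with ⟨h1, h2⟩ | ⟨h1, h2⟩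
      · rw [pvSegs_pos_eq v hne]
        unfold pvSegLen
        have hmax : max 1 (pvSegLenAux v 0 (d :: t)) = (d :: t).length := by omega
        rw [hmax, List.drop_length]
        simp [h2, pvSegs]
      · rw [pvSegs_pos_eq v hne]
        unfold pvSegLen
        have hmax : max 1 (pvSegLenAux v 0 (d :: t)) = pvSegLenAux v 0 (d :: t) := by omega
        rw [hmax]
        set s := pvSegLenAux v 0 (d :: t) with hs
        simp only [List.length_cons] at h1
        have hne' : (d :: t).drop s ≠ [] := by
          intro hnil
          have hdl := List.length_drop (l := d :: t) (i := s)
          rw [hnil] at hdl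
          simp only [List.length_nil, List.length_cons] at hdl
          omega
        have hb' : ∀ x ∈ (d :: t).drop s, 0 ≤ x ∧ x ≤ v :=
          fun x hx => hb x (List.mem_of_mem_drop hx)
        have hlen' : ((d :: t).drop s).length ≤ N := by
          simp only [List.length_drop, List.length_cons]
          simp only [List.length_cons] at h
          omega
        rw [h2, ih _ (k + 1) hlen' hne' hb']
        push_cast
        ring
  intro xs k hne hb; exact H xs.length xs k le_rfl hne hb

theorem pvIsPossible_char (v j : Int) {xs : List Int} (h : xs ≠ [])
    (hb : ∀ d ∈ xs, 0 ≤ d ∧ d ≤ v) :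
    pvIsPossible v xs j = decide ((pvSegs v xs : Int) ≤ j) := by
  rw [pvIsPossible, pvIsPossibleGo_eq]
  have hall : ∀ d ∈ xs, d ≤ v := fun d hd => (hb d hd).2
  have hj := pvRunA_jumps v xs 0 h hb
  rw [decide_eq_true hall, Bool.true_and]
  exact decide_eq_decide.mpr (by omega)

theorem pvIsPossible_bad (v j : Int) {xs : List Int} {d : Int} (hd : d ∈ xs) (hv : v < d) :
    pvIsPossible v xs j = false := by
  rw [pvIsPossible, pvIsPossibleGo_eq]
  have : ¬ (∀ x ∈ xs, x ≤ v) := fun hall => absurd (hall d hd) (by omega)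
  simp [this]

theorem pvIsPossible_nonpos (v j : Int) (xs : List Int) (hj : j ≤ 0) :
    pvIsPossible v xs j = false := by
  rw [pvIsPossible, pvIsPossibleGo_eq]
  have := pvRunA_fst_ge v xs 0 0
  have : ¬ ((pvRunA v xs 0 0).1 + 1 ≤ j) := by omega
  simp [this]

theorem pvRunA_dominate (v w : Int) (hvw : v ≤ w) : ∀ (xs : List Int),
    (∀ d ∈ xs, 0 ≤ d ∧ d ≤ v) → ∀ (k1 c1 k2 c2 : Int), 0 ≤ c1 → 0 ≤ c2 →
    (k2 < k1 ∨ (k2 = k1 ∧ c2 ≤ c1)) →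
    ((pvRunA w xs k2 c2).1 < (pvRunA v xs k1 c1).1 ∨
      ((pvRunA w xs k2 c2).1 = (pvRunA v xs k1 c1).1 ∧ (pvRunA w xs k2 c2).2 ≤ (pvRunA v xs k1 c1).2)) := by
  intro xs
  induction xs with
  | nil =>
    intro _ k1 c1 k2 c2 _ _ hinv
    simp only [pvRunA]
    rcases hinv with h | ⟨h1, h2⟩
    · left; exact h
    · right; exact ⟨h1, h2⟩
  | cons d t ih =>
    intro hb k1 c1 k2 c2 hc1 hc2 hinv
    obtain ⟨hd0, hdv⟩ := hb d (List.mem_cons_self ..)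
    have hbt : ∀ x ∈ t, 0 ≤ x ∧ x ≤ v := fun x hx => hb x (List.mem_cons_of_mem _ hx)
    by_cases h2 : w < c2 + d
    · rcases hinv with h | ⟨he, hle⟩
      · by_cases h1' : v < c1 + d
        · simp only [pvRunA, if_pos h2, if_pos h1']
          exact ih hbt (k1 + 1) d (k2 + 1) d hd0 hd0 (by omega)
        · simp only [pvRunA, if_pos h2, if_neg h1']
          exact ih hbt k1 (c1 + d) (k2 + 1) d (by omega) hd0 (by omega)
      · have h1' : v < c1 + d := by omega
        simp only [pvRunA, if_pos h2, if_pos h1']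
        exact ih hbt (k1 + 1) d (k2 + 1) d hd0 hd0 (by omega)
    · by_cases h1 : v < c1 + d
      · simp only [pvRunA, if_neg h2, if_pos h1]
        exact ih hbt (k1 + 1) d k2 (c2 + d) hd0 (by omega) (by rcases hinv with h | ⟨he, _⟩ <;> omega)
      · simp only [pvRunA, if_neg h2, if_neg h1]
        exact ih hbt k1 (c1 + d) k2 (c2 + d) (by omega) (by omega)
          (by rcases hinv with h | ⟨he, hle⟩ <;> [left; right] <;> omega)

theorem pvIsPossible_mono (j : Int) {v w : Int} (hvw : v ≤ w) {xs : List Int}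
    (h0 : ∀ d ∈ xs, 0 ≤ d) (h : pvIsPossible v xs j = true) : pvIsPossible w xs j = true := by
  rw [pvIsPossible, pvIsPossibleGo_eq] at h ⊢
  rw [Bool.and_eq_true, decide_eq_true_eq, decide_eq_true_eq] at h ⊢
  obtain ⟨hall, hrun⟩ := h
  have hb : ∀ d ∈ xs, 0 ≤ d ∧ d ≤ v := fun d hd => ⟨h0 d hd, hall d hd⟩
  refine ⟨fun d hd => le_trans (hall d hd) hvw, ?_⟩
  rcases pvRunA_dominate v w hvw xs hb 0 0 0 0 le_rfl le_rfl (Or.inr ⟨rfl, le_rfl⟩) with h | ⟨h, _⟩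
  · omega
  · omega

theorem pvRunA_total (v : Int) : ∀ (xs : List Int) (k c : Int), (∀ d ∈ xs, 0 ≤ d) →
    0 ≤ c → c + xs.sum ≤ v → pvRunA v xs k c = (k, c + xs.sum) := by
  intro xs
  induction xs with
  | nil => intro k c _ _ _; simp [pvRunA]
  | cons d t ih =>
    intro k c h0 hc hs
    have hts : 0 ≤ t.sum := List.sum_nonneg (fun x hx => h0 x (List.mem_cons_of_mem _ hx))
    have hd0 : 0 ≤ d := h0 d (List.mem_cons_self ..)
    have hno : ¬ (v < c + d) := by simp [List.sum_cons] at hs; omega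
    have := ih k (c + d) (fun x hx => h0 x (List.mem_cons_of_mem _ hx)) (by omega)
      (by simp [List.sum_cons] at hs ⊢; omega)
    simp [pvRunA, hno, this, List.sum_cons]
    ring

theorem pvIsPossible_total {v j : Int} {xs : List Int} (h0 : ∀ d ∈ xs, 0 ≤ d)
    (hs : xs.sum ≤ v) (hj : 1 ≤ j) : pvIsPossible v xs j = true := by
  rw [pvIsPossible, pvIsPossibleGo_eq]
  rw [Bool.and_eq_true, decide_eq_true_eq, decide_eq_true_eq]
  constructor
  · intro d hd
    exact le_trans (List.single_le_sum h0 d hd) hs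
  · rw [pvRunA_total v xs 0 0 h0 le_rfl (by omega)]
    omega

-- binary-search characterisation, with no assumption on the probed predicate
theorem pvBSearchGo_char (xs : List Int) (j : Int) : ∀ (fuel : Nat) (low high : Int),
    low ≤ high → (high - low).toNat < fuel →
    low ≤ pvBSearchGo xs j fuel low high ∧ pvBSearchGo xs j fuel low high ≤ high ∧
    (pvBSearchGo xs j fuel low high = low ∨ pvIsPossible (pvBSearchGo xs j fuel low high - 1) xs j = false) ∧
    (pvBSearchGo xs j fuel low high = high ∨ pvIsPossible (pvBSearchGo xs j fuel low high) xs j = true) := by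
  intro fuel
  induction fuel with
  | zero => intro low high hle hN; omega
  | succ N ih =>
    intro low high hle hN
    by_cases hlth : low < high
    · have hmd := PySem.Int.floordiv_mul_add_mod (low + high) 2
      have hm0 := PySem.Int.mod_nonneg (low + high) (b := 2) (by norm_num)
      have hm1 := PySem.Int.mod_lt (low + high) (b := 2) (by norm_num)
      set mid := PySem.Int.floordiv (low + high) 2 with hmid
      have hmidlo : low ≤ mid := by omega
      have hmidhi : mid < high := by omega
      rw [pvBSearchGo]
      simp only [if_pos hlth]
      rw [← hmid]
      by_cases hpm : pvIsPossible mid xs j = true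
      · rw [if_pos hpm]
        obtain ⟨i1, i2, i3, i4⟩ := ih low mid (by omega) (by omega)
        refine ⟨i1, by omega, i3, ?_⟩
        rcases i4 with h | h
        · right; rw [h]; exact hpm
        · right; exact h
      · rw [if_neg hpm]
        obtain ⟨i1, i2, i3, i4⟩ := ih (mid + 1) high (by omega) (by omega)
        refine ⟨by omega, i2, ?_, i4⟩
        rcases i3 with h | h
        · right; rw [h]; simpa using (Bool.not_eq_true _).mp hpm
        · right; exact h
    · rw [pvBSearchGo]
      simp only [if_neg hlth]
      exact ⟨le_rfl, hle, Or.inl (by simp), Or.inl (by omega)⟩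

theorem pvBSearch_char (xs : List Int) (j : Int) : ∀ (low high : Int), low ≤ high →
    low ≤ pvBSearch xs j low high ∧ pvBSearch xs j low high ≤ high ∧
    (pvBSearch xs j low high = low ∨ pvIsPossible (pvBSearch xs j low high - 1) xs j = false) ∧
    (pvBSearch xs j low high = high ∨ pvIsPossible (pvBSearch xs j low high) xs j = true) := by
  intro low high hle
  unfold pvBSearch
  exact pvBSearchGo_char xs j _ low high hle (by omega)

theorem pvFoldl_buildPrefix : ∀ (xs : List Int) (l : List Int) (c : Int),
    (xs.foldl pvBuildPrefix (l ++ [c], c)).1 = l ++ pvPre c xs := by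
  intro xs
  induction xs with
  | nil => intro l c; simp [pvPre]
  | cons d t ih =>
    intro l c
    have : pvBuildPrefix (l ++ [c], c) d = ((l ++ [c]) ++ [c + d], c + d) := by
      simp [pvBuildPrefix]
    rw [List.foldl_cons, this, ih (l ++ [c]) (c + d)]
    simp [pvPre]

theorem pvPre_length (c : Int) : ∀ (xs : List Int), (pvPre c xs).length = xs.length + 1 := by
  intro xs
  induction xs generalizing c with
  | nil => simp [pvPre]
  | cons d t ih => simp [pvPre, ih]

theorem pvPre_getElem (c : Int) : ∀ (xs : List Int) (k : Nat) (h : k < (pvPre c xs).length),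
    (pvPre c xs)[k] = c + (xs.take k).sum := by
  intro xs
  induction xs generalizing c with
  | nil =>
    intro k h
    simp [pvPre] at h
    subst h
    simp [pvPre]
  | cons d t ih =>
    intro k h
    match k with
    | 0 => simp [pvPre]
    | k + 1 =>
      have h' : k < (pvPre (c + d) t).length := by
        simp [pvPre] at h ⊢; omega
      simp only [pvPre, List.getElem_cons_succ, ih (c + d) k h', List.take_succ_cons,
        List.sum_cons]
      ring

theorem pvPre_getD {xs : List Int} {i : Int} (h0 : 0 ≤ i) (h1 : i ≤ xs.length) :
    PySem.List.pyGetD (pvPre 0 xs) i 0 = (xs.take i.toNat).sum := by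
  have hlen : i < ((pvPre 0 xs).length : Int) := by
    rw [pvPre_length]; push_cast; omega
  rw [PySem.List.pyGetD_eq_getElem _ _ h0 hlen, pvPre_getElem]
  ring

theorem pvUpperIndexGo_char (pre : List Int) (x : Int) : ∀ (fuel : Nat) (lo hi : Int),
    lo ≤ hi → (hi - lo).toNat < fuel →
    lo ≤ pvUpperIndexGo pre x fuel lo hi ∧ pvUpperIndexGo pre x fuel lo hi ≤ hi ∧
    (lo < pvUpperIndexGo pre x fuel lo hi → PySem.List.pyGetD pre (pvUpperIndexGo pre x fuel lo hi - 1) 0 ≤ x) ∧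
    (pvUpperIndexGo pre x fuel lo hi < hi → x < PySem.List.pyGetD pre (pvUpperIndexGo pre x fuel lo hi) 0) := by
  intro fuel
  induction fuel with
  | zero => intro lo hi hle hN; omega
  | succ N ih =>
    intro lo hi hle hN
    by_cases hlth : lo < hi
    · have hmd := PySem.Int.floordiv_mul_add_mod (lo + hi) 2
      have hm0 := PySem.Int.mod_nonneg (lo + hi) (b := 2) (by norm_num)
      have hm1 := PySem.Int.mod_lt (lo + hi) (b := 2) (by norm_num)
      set mid := PySem.Int.floordiv (lo + hi) 2 with hmid
      have hmidlo : lo ≤ mid := by omega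
      have hmidhi : mid < hi := by omega
      rw [pvUpperIndexGo]
      simp only [if_pos hlth]
      rw [← hmid]
      by_cases hpm : PySem.List.pyGetD pre mid 0 ≤ x
      · rw [if_pos hpm]
        have := ih (mid + 1) hi (by omega) (by omega)
        refine ⟨by omega, this.2.1, ?_, this.2.2.2⟩
        intro _
        rcases lt_or_eq_of_le this.1 with hh | hh
        · exact this.2.2.1 hh
        · rw [← hh]
          simpa using hpm
      · rw [if_neg hpm]
        have := ih lo mid (by omega) (by omega)
        refine ⟨this.1, by omega, this.2.2.1, ?_⟩
        intro _
        rcases lt_or_eq_of_le this.2.1 with hh | hh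
        · exact this.2.2.2 hh
        · rw [hh]; omega
    · rw [pvUpperIndexGo]
      simp only [if_neg hlth]
      exact ⟨le_rfl, hle, by omega, by omega⟩

theorem pvUpperIndex_char (pre : List Int) (x : Int) : ∀ (lo hi : Int), lo ≤ hi →
    lo ≤ pvUpperIndex pre x lo hi ∧ pvUpperIndex pre x lo hi ≤ hi ∧
    (lo < pvUpperIndex pre x lo hi → PySem.List.pyGetD pre (pvUpperIndex pre x lo hi - 1) 0 ≤ x) ∧
    (pvUpperIndex pre x lo hi < hi → x < PySem.List.pyGetD pre (pvUpperIndex pre x lo hi) 0) := by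
  intro lo hi hle
  unfold pvUpperIndex
  exact pvUpperIndexGo_char pre x _ lo hi hle (by omega)

theorem pvSumTakeAdd (xs : List Int) (p u : Nat) :
    (xs.take (p + u)).sum = (xs.take p).sum + ((xs.drop p).take u).sum := by
  rw [List.take_add, List.sum_append]

theorem pvSumTakeMono {xs : List Int} (h0 : ∀ d ∈ xs, 0 ≤ d) {u u' : Nat} (h : u ≤ u') :
    (xs.take u).sum ≤ (xs.take u').sum := by
  have hu : u' = u + (u' - u) := by omega
  rw [hu, List.take_add, List.sum_append]
  have : 0 ≤ ((xs.drop u).take (u' - u)).sum :=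
    List.sum_nonneg (fun x hx => h0 x (List.mem_of_mem_drop (List.mem_of_mem_take hx)))
  omega

theorem pvNxt_eq (v : Int) {xs : List Int} (h0 : ∀ d ∈ xs, 0 ≤ d) (hv : 0 ≤ v)
    {pos : Int} (hp0 : 0 ≤ pos) (hp1 : pos < xs.length) :
    pvUpperIndex (pvPre 0 xs) (PySem.List.pyGetD (pvPre 0 xs) pos 0 + v) pos ((xs.length : Int) + 1) - 1
      = pos + (pvSegLen v (xs.drop pos.toNat) : Int) := by
  set L : Int := (xs.length : Int) with hL
  set pre := pvPre 0 xs with hpre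
  set x := PySem.List.pyGetD pre pos 0 + v with hx
  set p : Nat := pos.toNat with hp
  have hpL : (p : Int) = pos := by omega
  set ys := xs.drop p with hys
  have hysl : (ys.length : Int) = L - pos := by
    rw [hys, List.length_drop]; push_cast; omega
  have hysmem : ∀ d ∈ ys, 0 ≤ d := fun d hd => h0 d (List.mem_of_mem_drop hd)
  obtain ⟨hs1, hs2, hs3⟩ := pvSegLenAux_char v ys 0 hv
  set s : Nat := pvSegLenAux v 0 ys with hseq
  obtain ⟨hr1, hr2, hr3, hr4⟩ := pvUpperIndex_char pre x pos (L + 1) (by omega)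
  set r := pvUpperIndex pre x pos (L + 1) with hr
  have hpres : ∀ {i : Int}, 0 ≤ i → i ≤ L → PySem.List.pyGetD pre i 0 = (xs.take i.toNat).sum := by
    intro i hi0 hi1
    exact pvPre_getD hi0 (by omega)
  have hrgt : pos < r := by
    rcases lt_or_eq_of_le hr1 with h | h
    · exact h
    · exfalso
      have := hr4 (by omega)
      rw [← h, hx, hpres hp0 (by omega)] at this
      omega
  set t1 : Nat := (r - 1 - pos).toNat with ht1
  have ht1i : (t1 : Int) = r - 1 - pos := by omega
  have ht1len : (t1 : Int) ≤ (ys.length : Int) := by omega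
  have hA : (ys.take t1).sum ≤ v := by
    have h1 := hr3 hrgt
    rw [hx, hpres (i := r - 1) (by omega) (by omega), hpres (i := pos) hp0 (by omega)] at h1
    have hdec : (r - 1).toNat = p + t1 := by omega
    rw [hdec, pvSumTakeAdd] at h1
    have hpp : (List.take p xs).sum = (List.take pos.toNat xs).sum := by rw [hp]
    rw [hys]
    omega
  have hB : (t1 : Int) < (ys.length : Int) → v < (ys.take (t1 + 1)).sum := by
    intro hlt
    have h1 := hr4 (by omega)
    rw [hx, hpres (i := r) (by omega) (by omega), hpres (i := pos) hp0 (by omega)] at h1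
    have hdec : r.toNat = p + (t1 + 1) := by omega
    rw [hdec, pvSumTakeAdd] at h1
    have hpp : (List.take p xs).sum = (List.take pos.toNat xs).sum := by rw [hp]
    rw [hys]
    omega
  have hts : t1 = s := by
    rcases Nat.lt_trichotomy t1 s with h | h | h
    · exfalso
      have hlt : (t1 : Int) < (ys.length : Int) := by
        have : (s : Int) ≤ (ys.length : Int) := by exact_mod_cast Nat.cast_le.mpr hs1
        omega
      have h1 := hB hlt
      have h2 : (ys.take (t1 + 1)).sum ≤ (ys.take s).sum :=
        pvSumTakeMono hysmem (by omega)
      omega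
    · exact h
    · exfalso
      have hlt : s < ys.length := by omega
      have h1 := hs3 hlt
      have h2 : (ys.take (s + 1)).sum ≤ (ys.take t1).sum :=
        pvSumTakeMono hysmem (by omega)
      omega
  have : pvSegLen v ys = s := by rw [pvSegLen, hseq]
  rw [this, ← hts]
  omega

theorem pvFeasibleGo_good (v j : Int) {xs : List Int} (h0 : ∀ d ∈ xs, 0 ≤ d ∧ d ≤ v) (hv : 0 ≤ v) :
    ∀ (fuel : Nat) (pos count : Int), 0 ≤ pos → pos ≤ xs.length → 0 ≤ count → count ≤ j →
    (xs.length : Int) - pos < fuel →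
    pvFeasibleGo (pvPre 0 xs) (xs.length : Int) j v fuel pos count
      = decide (count + (pvSegs v (xs.drop pos.toNat) : Int) ≤ j) := by
  have h0' : ∀ d ∈ xs, 0 ≤ d := fun d hd => (h0 d hd).1
  intro fuel
  induction fuel with
  | zero => intro pos count hp0 hp1 hc0 hc1 hfuel; omega
  | succ fuel ih =>
    intro pos count hp0 hp1 hc0 hc1 hfuel
    rw [pvFeasibleGo]
    by_cases hpL : pos < (xs.length : Int)
    · rw [if_pos hpL]
      have hne : xs.drop pos.toNat ≠ [] := by
        intro hnil
        have := List.length_drop (l := xs) (i := pos.toNat)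
        rw [hnil] at this
        simp at this
        omega
      have hsegs1 : 1 ≤ pvSegs v (xs.drop pos.toNat) := by
        rw [pvSegs_pos_eq v hne]; omega
      by_cases hcj : j ≤ count
      · rw [if_pos hcj]
        symm
        rw [decide_eq_false_iff_not]
        push_cast
        omega
      · rw [if_neg hcj]
        have hclt : count < j := by omega
        have hnxt := pvNxt_eq v h0' hv hp0 hpL
        rw [hnxt]
        set s : Nat := pvSegLen v (xs.drop pos.toNat) with hs
        have hspos : 1 ≤ s := by
          obtain ⟨d, t, hdt⟩ := List.exists_cons_of_ne_nil hne
          have hdmem : d ∈ xs := List.mem_of_mem_drop (by rw [hdt]; exact List.mem_cons_self ..)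
          rw [hs, hdt]
          exact pvSegLen_pos v (h0 d hdmem).1 (h0 d hdmem).2
        have hslen : (s : Int) ≤ (xs.length : Int) - pos := by
          obtain ⟨hs1, _, _⟩ := pvSegLenAux_char v (xs.drop pos.toNat) 0 hv
          rw [pvSegLen] at hs
          have : (xs.drop pos.toNat).length = xs.length - pos.toNat := List.length_drop ..
          omega
        have hs0 : ¬ ((pos + (s : Int)) == pos) := by
          rw [beq_iff_eq]; omega
        rw [if_neg hs0]
        rw [ih (pos + s) (count + 1) (by omega) (by omega) (by omega) (by omega) (by omega)]
        have hdd : (pos + (s : Int)).toNat = s + pos.toNat := by omega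
        have hdrop : xs.drop (pos + (s : Int)).toNat = (xs.drop pos.toNat).drop s := by
          rw [hdd, List.drop_drop, Nat.add_comm]
        rw [hdrop]
        have hsegs : pvSegs v (xs.drop pos.toNat) = 1 + pvSegs v ((xs.drop pos.toNat).drop s) := by
          rw [pvSegs_pos_eq v hne]
          rw [show max 1 (pvSegLen v (xs.drop pos.toNat)) = s from by rw [← hs]; omega]
        rw [hsegs]
        exact decide_eq_decide.mpr (by push_cast; omega)
    · rw [if_neg hpL]
      have hpeq : pos.toNat = xs.length := by omega
      rw [hpeq, List.drop_length]
      have : pvSegs v ([] : List Int) = 0 := by simp [pvSegs]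
      rw [this]
      symm
      rw [decide_eq_true_eq]
      push_cast
      omega

theorem pvFeasibleGo_bad (v j : Int) {xs : List Int} (h0 : ∀ d ∈ xs, 0 ≤ d) (hv : 0 ≤ v) :
    ∀ (fuel : Nat) (pos count : Int), 0 ≤ pos →
    (∃ q : Nat, pos ≤ (q : Int) ∧ q < xs.length ∧ v < xs.getD q 0) →
    (xs.length : Int) - pos < fuel →
    pvFeasibleGo (pvPre 0 xs) (xs.length : Int) j v fuel pos count = false := by
  intro fuel
  induction fuel with
  | zero =>
    intro pos count hp0 ⟨q, hq1, hq2, hq3⟩ hfuel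
    simp [pvFeasibleGo]
  | succ fuel ih =>
    intro pos count hp0 hw hfuel
    obtain ⟨q, hq1, hq2, hq3⟩ := hw
    have hpL : pos < (xs.length : Int) := by
      have : (q : Int) < (xs.length : Int) := by exact_mod_cast hq2
      omega
    rw [pvFeasibleGo]
    rw [if_pos hpL]
    by_cases hcj : j ≤ count
    · rw [if_pos hcj]
    · rw [if_neg hcj]
      have hnxt := pvNxt_eq v h0 hv hp0 hpL
      set s : Nat := pvSegLen v (xs.drop pos.toNat) with hs
      rw [hnxt]
      have hsle : (s : Int) ≤ (q : Int) - pos := by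
        by_contra hgt
        push_neg at hgt
        obtain ⟨_, hs2, _⟩ := pvSegLenAux_char v (xs.drop pos.toNat) 0 hv
        have hqp : q - pos.toNat < s := by omega
        have hqlen : q - pos.toNat < (xs.drop pos.toNat).length := by
          rw [List.length_drop]; omega
        have hmem : xs.getD q 0 ∈ (xs.drop pos.toNat).take s := by
          have hgl : ((xs.drop pos.toNat).take s)[q - pos.toNat]'(by
              simp [List.length_take, List.length_drop]; omega) = xs.getD q 0 := by
            rw [List.getElem_take, List.getElem_drop]
            rw [List.getD_eq_getElem _ _ hq2]
            congr 1
            omega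
          rw [← hgl]
          exact List.getElem_mem _
        have hle := List.single_le_sum
          (fun x hx => h0 x (List.mem_of_mem_drop (List.mem_of_mem_take hx))) _ hmem
        have hsaux : pvSegLenAux v 0 (xs.drop pos.toNat) = s := by rw [hs, pvSegLen]
        rw [hsaux] at hs2
        omega
      by_cases hs0 : (pos + (s : Int)) == pos
      · rw [if_pos hs0]
      · rw [if_neg hs0]
        have hspos : 1 ≤ (s : Int) := by
          rcases Nat.eq_zero_or_pos s with h | h
          · exfalso; apply hs0; simp [h]
          · exact_mod_cast h
        exact ih (pos + s) (count + 1) (by omega) ⟨q, by omega, hq2, hq3⟩ (by omega)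

theorem pvFeasible_eq (v j : Int) {xs : List Int} (h0 : ∀ d ∈ xs, 0 ≤ d) (hv : 0 ≤ v) (hj : 1 ≤ j) :
    pvFeasible (pvPre 0 xs) (xs.length : Int) j v = pvIsPossible v xs j := by
  by_cases hall : ∀ d ∈ xs, d ≤ v
  · by_cases hne : xs = []
    · subst hne
      rw [pvFeasible, pvFeasibleGo]
      simp only [List.length_nil, Nat.cast_zero, lt_self_iff_false, if_false]
      rw [pvIsPossible, pvIsPossibleGo]
      symm
      rw [decide_eq_true_eq]
      omega
    · rw [pvFeasible, pvFeasibleGo_good v j (fun d hd => ⟨h0 d hd, hall d hd⟩) hv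
        ((xs.length : Int).toNat + 1) 0 0 le_rfl (by positivity) le_rfl (by omega) (by omega)]
      rw [pvIsPossible_char v j hne (fun d hd => ⟨h0 d hd, hall d hd⟩)]
      have hz : ((0 : Int)).toNat = 0 := rfl
      rw [hz, List.drop_zero]
      exact decide_eq_decide.mpr (by omega)
  · push_neg at hall
    obtain ⟨d, hd, hvd⟩ := hall
    rw [pvIsPossible_bad v j hd hvd]
    obtain ⟨q, hq, hdq⟩ := List.mem_iff_getElem.mp hd
    rw [pvFeasible]
    refine pvFeasibleGo_bad v j h0 hv _ 0 0 le_rfl ⟨q, by omega, hq, ?_⟩ (by omega)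
    rw [List.getD_eq_getElem _ _ hq, hdq]
    exact hvd

theorem pvFeasible_nonpos (pre : List Int) {size j : Int} (v : Int)
    (hs : 0 < size) (hj : j ≤ 0) : pvFeasible pre size j v = false := by
  rw [pvFeasible, pvFeasibleGo]
  rw [if_pos hs, if_pos (by omega : j ≤ (0 : Int))]

theorem pvGrowGo_char (total : Int) : ∀ (fuel : Nat) (step : Int), 1 ≤ step →
    (total + 1 - step).toNat < fuel →
    (∃ k : Nat, pvGrowGo total fuel step = step * 2 ^ k) ∧ total < pvGrowGo total fuel step ∧
    1 ≤ pvGrowGo total fuel step := by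
  intro fuel
  induction fuel with
  | zero => intro step h1 hN; omega
  | succ N ih =>
    intro step h1 hN
    rw [pvGrowGo]
    by_cases hst : step ≤ total
    · rw [if_pos hst]
      obtain ⟨⟨k, hk⟩, hlt, hge⟩ := ih (2 * step) (by omega) (by omega)
      exact ⟨⟨k + 1, by rw [hk]; ring⟩, hlt, hge⟩
    · rw [if_neg hst]
      exact ⟨⟨0, by ring⟩, by omega, h1⟩

theorem pvGrow_char (total : Int) : ∀ (step : Int), 1 ≤ step →
    (∃ k : Nat, pvGrow total step = step * 2 ^ k) ∧ total < pvGrow total step ∧ 1 ≤ pvGrow total step := by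
  intro step h1
  unfold pvGrow
  exact pvGrowGo_char total _ step h1 (by omega)

-- the capped lifting loop: result w is infeasible, within [0, total-1], and maximal
-- in the sense that either w + 1 is feasible or w hit the cap total - 1
theorem pvLiftGo_char (pre : List Int) (size j total : Int) : ∀ (k : Nat) (fuel : Nat) (v : Int),
    k + 1 < fuel →
    0 ≤ v → v ≤ total - 1 → pvFeasible pre size j v = false →
    (pvFeasible pre size j (v + 2 * 2 ^ k) = true ∨ total - 1 < v + 2 * 2 ^ k) →
    0 ≤ pvLiftGo pre size j total fuel v (2 ^ k) ∧
    pvLiftGo pre size j total fuel v (2 ^ k) ≤ total - 1 ∧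
    pvFeasible pre size j (pvLiftGo pre size j total fuel v (2 ^ k)) = false ∧
    (pvFeasible pre size j (pvLiftGo pre size j total fuel v (2 ^ k) + 1) = true ∨
      pvLiftGo pre size j total fuel v (2 ^ k) = total - 1) := by
  intro k
  induction k with
  | zero =>
    intro fuel v hfuel hv hvt h0 h2
    obtain ⟨f, rfl⟩ : ∃ f, fuel = f + 1 := ⟨fuel - 1, by omega⟩
    rw [pvLiftGo]
    simp only [pow_zero, if_pos (by norm_num : (0:Int) < 1)]
    have hfd : PySem.Int.floordiv 1 2 = 0 := by decide
    obtain ⟨f', rfl⟩ : ∃ f', f = f' + 1 := ⟨f - 1, by omega⟩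
    by_cases hc : v + 1 < total ∧ pvFeasible pre size j (v + 1) = false
    · rw [if_pos hc, hfd, pvLiftGo]
      simp only [if_neg (by omega : ¬ (0:Int) < 0)]
      refine ⟨by omega, by omega, hc.2, ?_⟩
      rcases h2 with h | h
      · left
        have : v + 1 + 1 = v + 2 * 2 ^ 0 := by ring
        rw [this]
        exact h
      · right
        have : 2 * 2 ^ 0 = (2 : Int) := by norm_num
        omega
    · rw [if_neg hc, hfd, pvLiftGo]
      simp only [if_neg (by omega : ¬ (0:Int) < 0)]
      refine ⟨hv, hvt, h0, ?_⟩
      by_cases hlt : v + 1 < total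
      · left
        rcases Bool.eq_false_or_eq_true (pvFeasible pre size j (v + 1)) with hf | hf
        · exact hf
        · exact absurd ⟨hlt, hf⟩ hc
      · right; omega
  | succ k ih =>
    intro fuel v hfuel hv hvt h0 h2
    obtain ⟨f, rfl⟩ : ∃ f, fuel = f + 1 := ⟨fuel - 1, by omega⟩
    have hpow : (0:Int) < 2 ^ (k + 1) := by positivity
    rw [pvLiftGo]
    simp only [if_pos hpow]
    have hfd : PySem.Int.floordiv (2 ^ (k + 1)) 2 = 2 ^ k := by
      rw [PySem.Int.floordiv_eq_ediv_of_pos (by norm_num)]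
      rw [pow_succ, mul_comm]
      exact Int.mul_ediv_cancel_left _ (by norm_num)
    by_cases hc : v + 2 ^ (k + 1) < total ∧ pvFeasible pre size j (v + 2 ^ (k + 1)) = false
    · rw [if_pos hc, hfd]
      refine ih f (v + 2 ^ (k + 1)) (by omega) (by omega) (by omega) hc.2 ?_
      have heq : v + 2 ^ (k + 1) + 2 * 2 ^ k = v + 2 * 2 ^ (k + 1) := by ring
      rw [heq]
      exact h2
    · rw [if_neg hc, hfd]
      refine ih f v (by omega) hv hvt h0 ?_
      have heq : v + 2 * 2 ^ k = v + 2 ^ (k + 1) := by ring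
      rw [heq]
      by_cases hlt : v + 2 ^ (k + 1) < total
      · left
        rcases Bool.eq_false_or_eq_true (pvFeasible pre size j (v + 2 ^ (k + 1))) with hf | hf
        · exact hf
        · exact absurd ⟨hlt, hf⟩ hc
      · right; omega

theorem pvLift_char (pre : List Int) (size j total : Int) : ∀ (k : Nat) (v : Int),
    0 ≤ v → v ≤ total - 1 → pvFeasible pre size j v = false →
    (pvFeasible pre size j (v + 2 * 2 ^ k) = true ∨ total - 1 < v + 2 * 2 ^ k) →
    0 ≤ pvLift pre size j total v (2 ^ k) ∧
    pvLift pre size j total v (2 ^ k) ≤ total - 1 ∧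
    pvFeasible pre size j (pvLift pre size j total v (2 ^ k)) = false ∧
    (pvFeasible pre size j (pvLift pre size j total v (2 ^ k) + 1) = true ∨
      pvLift pre size j total v (2 ^ k) = total - 1) := by
  intro k v hv hvt h0 h2
  unfold pvLift
  have hk : (k : Int) < (2 : Int) ^ k := by
    exact_mod_cast Nat.lt_two_pow_self (n := k)
  have hge : ((2:Int) ^ k).toNat = 2 ^ k := by
    have := Int.toNat_of_nonneg (a := (2:Int) ^ k) (by positivity)
    have h2 : ((2:Nat) ^ k : Int) = (2:Int) ^ k := by push_cast; ring
    omega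
  exact pvLiftGo_char pre size j total k _ v (by omega) hv hvt h0 h2

theorem pvSegs_le_length (v : Int) : ∀ (xs : List Int), pvSegs v xs ≤ xs.length := by
  have H : ∀ (N : Nat) (xs : List Int), xs.length ≤ N → pvSegs v xs ≤ xs.length := by
    intro N
    induction N with
    | zero =>
      intro xs h
      have : xs = [] := List.eq_nil_of_length_eq_zero (by omega)
      subst this; simp [pvSegs]
    | succ N ih =>
      intro xs h
      by_cases hx : xs = []
      · subst hx; simp [pvSegs]
      · rw [pvSegs_pos_eq v hx]
        have hlen : 0 < xs.length := List.length_pos_iff.mpr hx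
        have hdrop := ih (xs.drop (max 1 (pvSegLen v xs))) (by simp [List.length_drop]; omega)
        simp [List.length_drop] at hdrop ⊢
        omega
  intro xs; exact H xs.length xs le_rfl

theorem pvUniq (xs : List Int) (j : Int) (h0 : ∀ d ∈ xs, 0 ≤ d) :
    ∀ (r1 r2 : Int), 1 ≤ r1 → 1 ≤ r2 →
    pvIsPossible r1 xs j = true → pvIsPossible r2 xs j = true →
    (r1 = 1 ∨ pvIsPossible (r1 - 1) xs j = false) →
    (r2 = 1 ∨ pvIsPossible (r2 - 1) xs j = false) → r1 = r2 := by
  intro r1 r2 h1 h2 hp1 hp2 hd1 hd2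
  rcases lt_trichotomy r1 r2 with hlt | heq | hgt
  · rcases hd2 with h | h
    · omega
    · have := pvIsPossible_mono j (v := r1) (w := r2 - 1) (by omega) h0 hp1
      rw [this] at h; cases h
  · exact heq
  · rcases hd1 with h | h
    · omega
    · have := pvIsPossible_mono j (v := r2) (w := r1 - 1) (by omega) h0 hp2
      rw [this] at h; cases h

-- facts about the generated distances
theorem pvDistances_nonneg {n m : Int} (hm : -2 ≤ m) (hm0 : m ≠ 0) :
    ∀ d ∈ pvDistancesA n m, 0 ≤ d := by
  intro d hd
  simp only [pvDistancesA, List.mem_map] at hd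
  obtain ⟨i, _, rfl⟩ := hd
  rcases lt_or_gt_of_ne hm0 with hneg | hpos
  · have := PySem.Int.mod_neg_bounds (i ^ 2) hneg
    omega
  · have := PySem.Int.mod_nonneg (i ^ 2) hpos
    omega

theorem pvDistances_head {n m : Int} (hn : 1 ≤ n) (hm0 : m ≠ 0) :
    ∃ t, pvDistancesA n m = 1 :: t := by
  refine ⟨(PySem.List.pyRange 1 n 1).map (fun i => 1 + PySem.Int.mod (i ^ 2) m), ?_⟩
  rw [pvDistancesA, PySem.List.pyRange_one_cons (by omega)]
  simp [PySem.Int.mod]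

-- ===== VERDICT (by name: the statement is the Claim_ definition above) =====
theorem find_minimum_max_jump_spec : Claim_equal_find_minimum_max_jump := by
  unfold Claim_equal_find_minimum_max_jump
  intro n m j _hDom hPre
  unfold Spec_find_minimum_max_jump
  by_cases hn : n ≤ 0
  · -- empty list of distances: both sides return 1
    have hxs : pvDistancesA n m = [] := by
      rw [pvDistancesA, PySem.List.pyRange_one_eq_nil (by omega : n ≤ (0:Int))]
      rfl
    have hxsB : pvDistancesB n m = [] := hxs
    have hA : find_minimum_max_jump n m j = 1 := by
      simp only [find_minimum_max_jump, hxs]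
      norm_num [pvBSearch, pvBSearchGo]
    have hB : find_minimum_max_jump_alt n m j = 1 := by
      simp only [find_minimum_max_jump_alt, hxsB]
      rw [if_neg (by simp)]
      simp only [List.length_nil, Nat.cast_zero]
      have hpre : ((List.foldl pvBuildPrefix ([0], 0) ([] : List Int))).1 = [0] := rfl
      rw [hpre, PySem.List.pyGetD_zero_cons]
      have hgrow : pvGrow 0 1 = 1 := by
        norm_num [pvGrow, pvGrowGo]
      rw [hgrow]
      have hlift : pvLift [0] (0 : Int) j 0 0 1 = 0 := by
        unfold pvLift
        norm_num [pvLiftGo, show PySem.Int.floordiv 1 2 = 0 from by decide]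
      rw [hlift]
      norm_num
    rw [hA, hB]
  · -- n ≥ 1 : nonempty distances, all nonnegative, head 1
    have hn1 : 1 ≤ n := by omega
    obtain ⟨hm2, hm0⟩ : -2 ≤ m ∧ m ≠ 0 := by
      rcases hPre with h | h
      · exact h
      · omega
    set xs := pvDistancesA n m with hxsdef
    have hBA : pvDistancesB n m = xs := rfl
    have h0 : ∀ d ∈ xs, 0 ≤ d := pvDistances_nonneg hm2 hm0
    obtain ⟨t, hxs1⟩ := pvDistances_head hn1 hm0
    rw [← hxsdef] at hxs1
    have hne : xs ≠ [] := by rw [hxs1]; simp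
    have h1mem : (1 : Int) ∈ xs := by rw [hxs1]; exact List.mem_cons_self ..
    have hts : 0 ≤ t.sum :=
      List.sum_nonneg (fun x hx => h0 x (by rw [hxs1]; exact List.mem_cons_of_mem _ hx))
    have hsum1 : 1 ≤ xs.sum := by rw [hxs1, List.sum_cons]; omega
    have hlen1 : 1 ≤ xs.length := by rw [hxs1]; simp
    obtain ⟨ha1, ha2, ha3, ha4⟩ := pvBSearch_char xs j 1 xs.sum hsum1
    set rA := pvBSearch xs j 1 xs.sum with hrAdef
    have hA : find_minimum_max_jump n m j = rA := rfl
    by_cases hJ : ((xs.length : Int) ≤ j)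
    · -- B takes the direct-max branch; here 1 ≤ length ≤ j
      have hj : 1 ≤ j := by
        have : (1 : Int) ≤ (xs.length : Int) := by exact_mod_cast hlen1
        omega
      have hB : find_minimum_max_jump_alt n m j = (PySem.List.max? xs (fun d => d)).getD 0 := by
        simp only [find_minimum_max_jump_alt, hBA]
        rw [if_pos ⟨by exact_mod_cast Nat.cast_ne_zero.mpr (by omega), hJ⟩]
      obtain ⟨mx, hmx⟩ : ∃ mx, PySem.List.max? xs (fun d => d) = some mx := by
        cases hmm : PySem.List.max? xs (fun d => d) with
        | none => exact absurd ((PySem.List.max?_eq_none_iff xs (fun d => d)).mp hmm) hne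
        | some mx => exact ⟨mx, rfl⟩
      have hMval : (PySem.List.max? xs (fun d => d)).getD 0 = mx := by rw [hmx]; rfl
      have hub : ∀ y ∈ xs, y ≤ mx := fun y hy => PySem.List.max?_isMax hmx y hy
      have hmem : mx ∈ xs := PySem.List.max?_mem hmx
      have hmx1 : 1 ≤ mx := hub 1 h1mem
      have hPmx : pvIsPossible mx xs j = true := by
        rw [pvIsPossible_char mx j hne (fun d hd => ⟨h0 d hd, hub d hd⟩)]
        rw [decide_eq_true_eq]
        have := pvSegs_le_length mx xs
        have hcast : ((pvSegs mx xs : Int)) ≤ (xs.length : Int) := by exact_mod_cast this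
        omega
      have hPmx1 : pvIsPossible (mx - 1) xs j = false := pvIsPossible_bad _ j hmem (by omega)
      have hPrA : pvIsPossible rA xs j = true := by
        rcases ha4 with h | h
        · rw [h]; exact pvIsPossible_total h0 le_rfl hj
        · exact h
      have := pvUniq xs j h0 rA mx ha1 hmx1 hPrA hPmx ha3 (Or.inr hPmx1)
      rw [hA, hB, hMval, this]
    · -- B takes the prefix-sum lifting branch
      have hpre : (xs.foldl pvBuildPrefix ([0], 0)).1 = pvPre 0 xs := by
        have := pvFoldl_buildPrefix xs [] 0
        simpa using this
      have htot : PySem.List.pyGetD (pvPre 0 xs) ((xs.length : Int)) 0 = xs.sum := by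
        rw [pvPre_getD (by positivity) le_rfl]
        simp
      have hB : find_minimum_max_jump_alt n m j
          = pvLift (pvPre 0 xs) ((xs.length : Int)) j xs.sum 0 (pvGrow xs.sum 1) + 1 := by
        simp only [find_minimum_max_jump_alt, hBA]
        rw [if_neg (by intro hcon; exact hJ hcon.2)]
        rw [hpre, htot]
      obtain ⟨⟨k, hk⟩, hgt, hge1⟩ := pvGrow_char xs.sum 1 le_rfl
      rw [one_mul] at hk
      have hpk : (0:Int) < 2 ^ k := by positivity
      by_cases hj : 1 ≤ j
      · -- feasible at the top of the range; lifting stops at the true threshold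
        have hQ0 : pvFeasible (pvPre 0 xs) ((xs.length : Int)) j 0 = false := by
          rw [pvFeasible_eq 0 j h0 le_rfl hj]
          exact pvIsPossible_bad 0 j h1mem (by omega)
        obtain ⟨hw0, hwcap, hwf, hwt⟩ := pvLift_char (pvPre 0 xs) ((xs.length : Int)) j xs.sum
          k 0 le_rfl (by omega) hQ0 (Or.inr (by omega))
        set w := pvLift (pvPre 0 xs) ((xs.length : Int)) j xs.sum 0 (2 ^ k) with hwdef
        have hPw : pvIsPossible w xs j = false := by
          rw [← pvFeasible_eq w j h0 hw0 hj]
          exact hwf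
        have hPw1 : pvIsPossible (w + 1) xs j = true := by
          rcases hwt with h | h
          · rw [← pvFeasible_eq (w + 1) j h0 (by omega) hj]
            exact h
          · rw [h]
            have : xs.sum - 1 + 1 = xs.sum := by ring
            rw [this]
            exact pvIsPossible_total h0 le_rfl hj
        have hPrA : pvIsPossible rA xs j = true := by
          rcases ha4 with h | h
          · rw [h]; exact pvIsPossible_total h0 le_rfl hj
          · exact h
        have huniq := pvUniq xs j h0 rA (w + 1) ha1 (by omega) hPrA hPw1 ha3
          (Or.inr (by simpa using hPw))
        rw [hA, hB, hk, ← hwdef, huniq]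
      · -- j ≤ 0: nothing is ever feasible; A's search climbs to the sum, and so
        -- does B's capped lifting
        have hj0 : j ≤ 0 := by omega
        have hszpos : (0 : Int) < (xs.length : Int) := by exact_mod_cast hlen1
        have hFalse : ∀ v, pvFeasible (pvPre 0 xs) ((xs.length : Int)) j v = false :=
          fun v => pvFeasible_nonpos _ v hszpos hj0
        obtain ⟨hw0, hwcap, hwf, hwt⟩ := pvLift_char (pvPre 0 xs) ((xs.length : Int)) j xs.sum
          k 0 le_rfl (by omega) (hFalse 0) (Or.inr (by omega))
        set w := pvLift (pvPre 0 xs) ((xs.length : Int)) j xs.sum 0 (2 ^ k) with hwdef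
        have hwend : w = xs.sum - 1 := by
          rcases hwt with h | h
          · rw [hFalse (w + 1)] at h; cases h
          · exact h
        have hrend : rA = xs.sum := by
          rcases ha4 with h | h
          · exact h
          · rw [pvIsPossible_nonpos rA j xs hj0] at h; cases h
        rw [hA, hB, hk, ← hwdef, hwend, hrend]
        ring
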